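-- pv_equiv track=rewrite | github.com/canonical/certification-errbot | plugins/certification/pr_cache_utils/review_checker.py | _analyze_review_states
-- ===== SOURCE A (Python) =====
-- from typing import Dict, Optional
--
-- def _analyze_review_states(reviews: list) -> Dict[str, bool]:
--     """
--     Analyze review states to determine approval/changes requested status.
--
--     Args:
--         reviews: List of review objects from GitHub API
--
--     Returns:
--         Dict with 'has_approvals' and 'has_changes_requested' booleans
--     """
--     has_approvals = False
--     has_changes_requested = False
--
--     for review in reviews:
--         state = review.get("state")
--         if state == "APPROVED":
--             has_approvals = True
--         elif state == "CHANGES_REQUESTED":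
--             has_changes_requested = True
--
--     return {
--         "has_approvals": has_approvals,
--         "has_changes_requested": has_changes_requested
--     }
-- ===== SOURCE B (Python) =====
-- def _analyze_review_states(reviews: list) -> dict:
--     return {
--         "has_approvals": any(r.get("state") == "APPROVED" for r in reviews),
--         "has_changes_requested": any(r.get("state") == "CHANGES_REQUESTED" for r in reviews),
--     }
-- ===== Notes on version B (the rewrite author's own statement) =====
-- stated objective: idiomatic
-- what changed: B replaces A's single loop threading two boolean accumulators through an if/elif chain with two independent short-circuiting any() passes, one per flag, each stopping at the first matching review.
import Mathlib
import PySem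

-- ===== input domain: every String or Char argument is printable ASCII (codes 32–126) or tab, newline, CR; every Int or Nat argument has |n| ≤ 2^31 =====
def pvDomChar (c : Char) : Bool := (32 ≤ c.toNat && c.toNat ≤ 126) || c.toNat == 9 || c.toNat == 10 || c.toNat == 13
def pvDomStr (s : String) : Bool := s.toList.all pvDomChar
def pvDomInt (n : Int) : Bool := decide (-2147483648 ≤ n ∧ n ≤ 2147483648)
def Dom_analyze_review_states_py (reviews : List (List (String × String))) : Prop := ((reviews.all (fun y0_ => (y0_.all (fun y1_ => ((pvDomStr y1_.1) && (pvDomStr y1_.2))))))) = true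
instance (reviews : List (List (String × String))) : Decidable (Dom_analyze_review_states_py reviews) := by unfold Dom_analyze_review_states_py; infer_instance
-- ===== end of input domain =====

-- A loops once with two boolean accumulators; B makes two independent short-circuiting
-- any-passes, one per flag (objective: idiomatic).

-- ===== PORT A =====
def analyze_review_states_py (reviews : List (List (String × String))) : List (String × Bool) :=
  let p := reviews.foldl (fun (acc : Bool × Bool) review =>
    let state := (PySem.Dict.mk review).get? "state"
    if state = some "APPROVED" then (true, acc.2)
    else if state = some "CHANGES_REQUESTED" then (acc.1, true)
    else acc) (false, false)
  [("has_approvals", p.1), ("has_changes_requested", p.2)]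

-- ===== PORT B =====
def analyze_review_states_py_alt (reviews : List (List (String × String))) : List (String × Bool) :=
  [("has_approvals", reviews.any (fun r => (PySem.Dict.mk r).get? "state" == some "APPROVED")),
   ("has_changes_requested", reviews.any (fun r => (PySem.Dict.mk r).get? "state" == some "CHANGES_REQUESTED"))]

-- ===== PRECONDITION & SPEC =====
def Spec_analyze_review_states_py (reviews : List (List (String × String))) (out : List (String × Bool)) : Prop := out = analyze_review_states_py_alt reviews
instance (reviews : List (List (String × String))) (out : List (String × Bool)) : Decidable (Spec_analyze_review_states_py reviews out) := by unfold Spec_analyze_review_states_py; infer_instance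

-- ===== CLAIM =====
def Claim_equal_analyze_review_states_py : Prop := ∀ (reviews : List (List (String × String))), Dom_analyze_review_states_py reviews → Spec_analyze_review_states_py reviews (analyze_review_states_py reviews)

-- ===== LEMMAS AND PROOFS =====

-- A's fold computes, for each target state, whether some review has it (or the initial flag).
theorem pv_fold_char (rs : List (List (String × String))) (ha hc : Bool) :
    rs.foldl (fun (acc : Bool × Bool) review =>
      let state := (PySem.Dict.mk review).get? "state"
      if state = some "APPROVED" then (true, acc.2)
      else if state = some "CHANGES_REQUESTED" then (acc.1, true)
      else acc) (ha, hc)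
    = (ha || rs.any (fun r => (PySem.Dict.mk r).get? "state" == some "APPROVED"),
       hc || rs.any (fun r => (PySem.Dict.mk r).get? "state" == some "CHANGES_REQUESTED")) := by
  induction rs generalizing ha hc with
  | nil => simp
  | cons r rs ih =>
    simp only [List.foldl_cons, List.any_cons]
    split_ifs with h1 h2
    · rw [ih]
      have e1 : ((PySem.Dict.mk r).get? "state" == some "APPROVED") = true := by simp [h1]
      have e2 : ((PySem.Dict.mk r).get? "state" == some "CHANGES_REQUESTED") = false := by
        simp [h1]
      simp [e1, e2]
    · rw [ih]
      have e1 : ((PySem.Dict.mk r).get? "state" == some "APPROVED") = false := by simp [h1]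
      have e2 : ((PySem.Dict.mk r).get? "state" == some "CHANGES_REQUESTED") = true := by simp [h2]
      simp [e1, e2]
    · rw [ih]
      have e1 : ((PySem.Dict.mk r).get? "state" == some "APPROVED") = false := by simp [h1]
      have e2 : ((PySem.Dict.mk r).get? "state" == some "CHANGES_REQUESTED") = false := by simp [h2]
      simp [e1, e2]

-- ===== VERDICT =====
theorem analyze_review_states_py_spec : Claim_equal_analyze_review_states_py := by
  intro reviews _
  show _ = _
  unfold analyze_review_states_py analyze_review_states_py_alt
  simp only [pv_fold_char, Bool.false_or]
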